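-- pv_equiv track=rewrite | github.com/CartoDB/analytics-toolbox-core | modules/quadkey/redshift/lib/__init__.py | kring_distances
-- ===== SOURCE A (Python) =====
-- def quadint_from_zxy(z, x, y):
--     if z < 0 or z > 29:
--         return None
--
--     quadint = y
--     quadint <<= z
--     quadint |= x
--     quadint <<= 5
--     quadint |= z
--     return quadint
--
-- def zxy_from_quadint(quadint):
--     z = quadint & 31
--     x = (quadint >> 5) & ((1 << z) - 1)
--     y = quadint >> (z + 5)
--     return {'z': z, 'x': x, 'y': y}
--
-- def sibling(quadint, direction):
--     if quadint == 0:
--         return 0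
--     direction = direction.lower()
--     if direction not in ['left', 'right', 'up', 'down']:
--         raise Exception('Wrong direction argument passed to sibling')
--
--     tile = zxy_from_quadint(quadint)
--     z = tile['z']
--     x = tile['x']
--     y = tile['y']
--     tiles_per_level = 2 << (z - 1)
--     if direction == 'left':
--         x = x - 1 if x > 0 else tiles_per_level - 1
--
--     if direction == 'right':
--         x = x + 1 if x < tiles_per_level - 1 else 0
--
--     if direction == 'up':
--         y = y - 1 if y > 0 else tiles_per_level - 1
--
--     if direction == 'down':
--         y = y + 1 if y < tiles_per_level - 1 else 0
--
--     return quadint_from_zxy(z, x, y)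
--
-- def kring_distances(origin, size):
--     corner_quadint = origin
--     # Traverse to top left corner
--     for i in range(0, size):
--         corner_quadint = sibling(corner_quadint, 'left')
--         corner_quadint = sibling(corner_quadint, 'up')
--
--     neighbors = []
--     traversal_quadint = 0
--
--     for j in range(0, size * 2 + 1):
--         traversal_quadint = corner_quadint
--         for i in range(0, size * 2 + 1):
--             neighbors.append(
--                 {
--                     'index': traversal_quadint,
--                     'distance': max(abs(i - size), abs(j - size)),  # Chebychev distance
--                 }
--             )
--             traversal_quadint = sibling(traversal_quadint, 'right')
--         corner_quadint = sibling(corner_quadint, 'down')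
--
--     return neighbors
-- ===== SOURCE B (Python) =====
-- def quadint_from_zxy(z, x, y):
--     if z < 0 or z > 29:
--         return None
--     return (((y << z) | x) << 5) | z
--
-- def zxy_from_quadint(quadint):
--     z = quadint & 31
--     x = (quadint >> 5) & ((1 << z) - 1)
--     y = quadint >> (z + 5)
--     return {'z': z, 'x': x, 'y': y}
--
-- def kring_distances(origin, size):
--     n = 2 * size + 1
--     if n <= 0:
--         return []
--     if origin == 0:
--         return [{'index': 0, 'distance': max(abs(i - size), abs(j - size))}
--                 for j in range(n) for i in range(n)]
--     tile = zxy_from_quadint(origin)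
--     z, x, y = tile['z'], tile['x'], tile['y']
--     tiles = 2 << (z - 1)
--     return [{'index': quadint_from_zxy(z, (x - size + i) % tiles, (y - size + j) % tiles),
--              'distance': max(abs(i - size), abs(j - size))}
--             for j in range(n) for i in range(n)]
-- ===== Notes on version B (the rewrite author's own statement) =====
-- stated objective: simpler
-- what changed: B replaces A's sibling-based stepping walk (traverse to the top-left corner one tile at a time, then step right/down cell by cell) with a direct closed-form enumeration: decode the origin once and emit quadint_from_zxy(z,(x-size+i)%tiles,(y-size+j)%tiles) for each grid cell.
-- outside the precondition, e.g. on kring_distances(30, 0): A returns [{'index': 30, 'distance': 0}], B returns [{'index': None, 'distance': 0}]; on kring_distances(321, 0): A returns [{'index': 321, 'distance': 0}], B returns [{'index': 65, 'distance': 0}]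
import Mathlib
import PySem

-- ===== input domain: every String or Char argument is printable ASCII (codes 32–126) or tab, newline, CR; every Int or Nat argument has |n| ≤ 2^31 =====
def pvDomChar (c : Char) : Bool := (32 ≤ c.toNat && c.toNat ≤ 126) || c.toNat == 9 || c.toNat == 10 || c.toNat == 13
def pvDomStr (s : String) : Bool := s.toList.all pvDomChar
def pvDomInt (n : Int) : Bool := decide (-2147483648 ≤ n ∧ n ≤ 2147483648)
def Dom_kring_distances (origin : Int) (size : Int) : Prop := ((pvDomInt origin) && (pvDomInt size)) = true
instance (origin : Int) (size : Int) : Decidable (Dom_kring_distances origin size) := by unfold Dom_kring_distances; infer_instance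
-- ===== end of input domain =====

-- B replaces A's sibling-stepping walk by a direct closed-form enumeration (decode once,
-- modular wrap per cell); same cost class, simpler structure; equivalence proved on Pre_.

-- ===== PORT A =====
def quadint_from_zxy (z x y : Int) : Option Int :=
  if z < 0 ∨ z > 29 then none
  else some (PySem.Int.bor ((PySem.Int.bor (y <<< z.toNat) x) <<< (5:Nat)) z)

def zxy_from_quadint (q : Int) : Int × Int × Int :=
  let z := PySem.Int.band q 31
  (z, PySem.Int.band (q >>> (5:Nat)) (((1:Int) <<< z.toNat) - 1), q >>> (z + 5).toNat)

-- the closed-form value of a valid encode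

-- Port note: Python's sibling raises on a direction outside {left,right,up,down} and on
-- z = 0 with quadint ≠ 0 (2 << -1 is a ValueError); the port returns none there.
def sibling (q : Int) (direction : String) : Option Int :=
  if q = 0 then some 0 else
  let dir := PySem.Str.lower direction
  if ¬ (dir = "left" ∨ dir = "right" ∨ dir = "up" ∨ dir = "down") then none else
  let t := zxy_from_quadint q
  let z := t.1
  if z - 1 < 0 then none else
  let tiles := (2:Int) <<< (z - 1).toNat
  let x := if dir = "left" then (if t.2.1 > 0 then t.2.1 - 1 else tiles - 1) else t.2.1
  let x := if dir = "right" then (if x < tiles - 1 then x + 1 else 0) else x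
  let y := if dir = "up" then (if t.2.2 > 0 then t.2.2 - 1 else tiles - 1) else t.2.2
  let y := if dir = "down" then (if y < tiles - 1 then y + 1 else 0) else y
  quadint_from_zxy z x y

def kring_distances (origin : Int) (size : Int) : List (List (String × Int)) :=
  let corner := (PySem.List.pyRange 0 size 1).foldl
    (fun c _ => (c.bind (fun q => sibling q "left")).bind (fun q => sibling q "up"))
    (some origin)
  let res := (PySem.List.pyRange 0 (size * 2 + 1) 1).foldl
    (fun (st : List (List (String × Int)) × Option Int) j =>
      let inner := (PySem.List.pyRange 0 (size * 2 + 1) 1).foldl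
        (fun (st2 : List (List (String × Int)) × Option Int) i =>
          (st2.1 ++ [[("index", st2.2.getD 0), ("distance", max |i - size| |j - size|)]],
           st2.2.bind (fun q => sibling q "right")))
        (st.1, st.2)
      (inner.1, st.2.bind (fun q => sibling q "down")))
    ([], corner)
  res.1

-- ===== PORT B =====
-- Port of Source B; the .getD 0 covers quadint_from_zxy's None (z > 29), which Pre_ excludes.
def kring_distances_alt (origin : Int) (size : Int) : List (List (String × Int)) :=
  let n := 2 * size + 1
  if n ≤ 0 then []
  else if origin = 0 then
    (PySem.List.pyRange 0 n 1).flatMap (fun j =>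
      (PySem.List.pyRange 0 n 1).map (fun i =>
        [("index", (0:Int)), ("distance", max |i - size| |j - size|)]))
  else
    let t := zxy_from_quadint origin
    let tiles := (2:Int) <<< (t.1 - 1).toNat
    (PySem.List.pyRange 0 n 1).flatMap (fun j =>
      (PySem.List.pyRange 0 n 1).map (fun i =>
        [("index", (quadint_from_zxy t.1 (PySem.Int.mod (t.2.1 - size + i) tiles)
            (PySem.Int.mod (t.2.2 - size + j) tiles)).getD 0),
         ("distance", max |i - size| |j - size|)]))

-- ===== PRECONDITION & SPEC =====
-- Pre_ admits: any negative size (A returns [] untouched); origin 0; and any well-formed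
-- quadint (zoom z in 1..29, nonnegative, y coordinate within [0, 2^z)).  It EXCLUDES
-- malformed origins on which A still returns a value — negative or out-of-range y, or
-- zoom ≥ 30 when size = 0 — where A's sibling-stepping wrap (and the index it yields) is
-- an accident of A's implementation that B's modular arithmetic does not reproduce.
def Pre_kring_distances (origin : Int) (size : Int) : Prop :=
  size < 0 ∨ origin = 0 ∨
    (0 ≤ origin ∧ 1 ≤ PySem.Int.band origin 31 ∧ PySem.Int.band origin 31 ≤ 29 ∧
     origin >>> (PySem.Int.band origin 31 + 5).toNat
       < 2 ^ (PySem.Int.band origin 31).toNat)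

instance (origin : Int) (size : Int) : Decidable (Pre_kring_distances origin size) := by
  unfold Pre_kring_distances; infer_instance

def pvWitness_kring_distances : Int × Int := (1347, 1)

def Spec_kring_distances (origin : Int) (size : Int) (out : List (List (String × Int))) : Prop :=
  out = kring_distances_alt origin size
instance (origin : Int) (size : Int) (out : List (List (String × Int))) :
    Decidable (Spec_kring_distances origin size out) := by
  unfold Spec_kring_distances; infer_instance

-- ===== CLAIM (what is proved, stated in full; the proofs are below) =====
def Claim_equal_kring_distances : Prop := ∀ (origin : Int) (size : Int), Dom_kring_distances origin size → Pre_kring_distances origin size → Spec_kring_distances origin size (kring_distances origin size)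

-- ===== LEMMAS AND PROOFS =====
lemma band_mask (q : Int) (k : Nat) (hq : 0 ≤ q) :
    PySem.Int.band q (2 ^ k - 1) = q % 2 ^ k := by
  have hp : (0:Int) < 2 ^ k := by positivity
  rw [PySem.Int.band_of_nonneg hq (by omega)]
  have h2 : ((2:Int) ^ k) = ((2 ^ k : Nat) : Int) := by push_cast; ring
  have ht : ((2:Int) ^ k - 1).toNat = 2 ^ k - 1 := by omega
  rw [ht, Nat.and_two_pow_sub_one_eq_mod, h2, Int.natCast_mod, Int.toNat_of_nonneg hq]

lemma shr_arith (q : Int) (k : Nat) : q >>> k = q / 2 ^ k := by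
  rw [Int.shiftRight_eq_div_pow]; norm_num

lemma shl_arith (q : Int) (k : Nat) : q <<< k = q * 2 ^ k := Int.shiftLeft_eq q k

lemma bor_add (a b : Int) (k : Nat) (ha : 0 ≤ a) (hb : 0 ≤ b) (hb' : b < 2 ^ k) :
    PySem.Int.bor (a <<< k) b = a * 2 ^ k + b := by
  have h2 : ((2:Int) ^ k) = ((2 ^ k : Nat) : Int) := by push_cast; ring
  have h1 : (0:Int) ≤ a <<< k := by rw [shl_arith]; positivity
  rw [PySem.Int.bor_of_nonneg h1 hb, shl_arith]
  have hbn : b.toNat < 2 ^ k := by omega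
  have hs : (a * 2 ^ k).toNat = a.toNat <<< k := by
    rw [Nat.shiftLeft_eq]
    conv_lhs => rw [← Int.toNat_of_nonneg ha, h2, ← Nat.cast_mul, Int.toNat_natCast]
  rw [hs, ← Nat.shiftLeft_add_eq_or_of_lt hbn, Nat.shiftLeft_eq]
  push_cast
  rw [Int.toNat_of_nonneg ha, Int.toNat_of_nonneg hb]

def encV (z x y : Int) : Int := (y * 2 ^ z.toNat + x) * 32 + z

lemma enc_eq (z x y : Int) (hz : 0 ≤ z) (hz29 : z ≤ 29) (hx : 0 ≤ x)
    (hx' : x < 2 ^ z.toNat) (hy : 0 ≤ y) :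
    quadint_from_zxy z x y = some (encV z x y) := by
  rw [quadint_from_zxy, if_neg (by omega)]
  have h1 : PySem.Int.bor (y <<< z.toNat) x = y * 2 ^ z.toNat + x :=
    bor_add y x z.toNat hy hx hx'
  rw [h1]
  have h2 : PySem.Int.bor ((y * 2 ^ z.toNat + x) <<< (5:Nat)) z
      = (y * 2 ^ z.toNat + x) * 2 ^ 5 + z := by
    refine bor_add _ z 5 ?_ hz (by omega)
    positivity
  rw [h2, encV]; norm_num

lemma dec_arith (q : Int) (hq : 0 ≤ q) :
    zxy_from_quadint q
      = (q % 32, q / 32 % 2 ^ ((q % 32).toNat), q / 2 ^ ((q % 32).toNat + 5)) := by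
  have hz : PySem.Int.band q 31 = q % 32 := by
    have := band_mask q 5 hq; norm_num at this ⊢; exact this
  have hx : PySem.Int.band (q >>> (5:Nat)) (((1:Int) <<< (q % 32).toNat) - 1)
      = q / 32 % 2 ^ ((q % 32).toNat) := by
    rw [shr_arith, shl_arith, one_mul]
    have := band_mask (q / 2 ^ 5) ((q % 32).toNat) (by positivity)
    norm_num at this ⊢
    exact this
  have hy : q >>> ((q % 32) + 5).toNat = q / 2 ^ ((q % 32).toNat + 5) := by
    rw [shr_arith]
    have h5 : ((q % 32) + 5).toNat = (q % 32).toNat + 5 := by omega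
    rw [h5]
  simp only [zxy_from_quadint, hz, hx, hy]

lemma dec_enc (z x y : Int) (hz : 0 ≤ z) (hz31 : z < 32) (hx : 0 ≤ x)
    (hx' : x < 2 ^ z.toNat) (hy : 0 ≤ y) :
    zxy_from_quadint (encV z x y) = (z, x, y) := by
  have hT : (0:Int) < 2 ^ z.toNat := by positivity
  have hA : (0:Int) ≤ y * 2 ^ z.toNat + x := by nlinarith
  have henc : (0:Int) ≤ encV z x y := by rw [encV]; omega
  rw [dec_arith _ henc, encV]
  have hm : ((y * 2 ^ z.toNat + x) * 32 + z) % 32 = z := by omega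
  have hd : ((y * 2 ^ z.toNat + x) * 32 + z) / 32 = y * 2 ^ z.toNat + x := by omega
  rw [hm, hd]
  have hx2 : (y * 2 ^ z.toNat + x) % 2 ^ z.toNat = x := by
    rw [add_comm, mul_comm, Int.add_mul_emod_self_left, Int.emod_eq_of_lt hx hx']
  have hy2 : ((y * 2 ^ z.toNat + x) * 32 + z) / 2 ^ (z.toNat + 5) = y := by
    have h1 : (2:Int) ^ (z.toNat + 5) = 32 * 2 ^ z.toNat := by rw [pow_add]; ring
    rw [h1, ← Int.ediv_ediv_eq_ediv_mul]
    rw [hd, add_comm, mul_comm, Int.add_mul_ediv_left _ _ (by omega),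
        Int.ediv_eq_zero_of_lt hx hx']
    · ring
    · norm_num
  rw [hx2, hy2]

lemma tiles_eq (z : Int) (hz : 1 ≤ z) : (2:Int) <<< (z - 1).toNat = 2 ^ z.toNat := by
  rw [shl_arith]
  have h : z.toNat = (z - 1).toNat + 1 := by omega
  rw [h, pow_succ]; ring

lemma encV_pos (z x y : Int) (hz : 1 ≤ z) (hx : 0 ≤ x) (hy : 0 ≤ y) :
    0 < encV z x y := by
  have hT : (0:Int) < 2 ^ z.toNat := by positivity
  have hA : (0:Int) ≤ y * 2 ^ z.toNat + x := by nlinarith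
  rw [encV]; omega

lemma sibling_right (z x y : Int) (hz : 1 ≤ z) (hz29 : z ≤ 29) (hx : 0 ≤ x)
    (hx' : x < 2 ^ z.toNat) (hy : 0 ≤ y) (hy' : y < 2 ^ z.toNat) :
    sibling (encV z x y) "right"
      = some (encV z ((x + 1) % 2 ^ z.toNat) y) := by
  have hT : (0:Int) < 2 ^ z.toNat := by positivity
  have hq := encV_pos z x y hz hx hy
  rw [sibling, if_neg (by omega)]
  simp only [dec_enc z x y (by omega) (by omega) hx hx' hy]
  rw [if_neg (by decide), if_neg (by omega), tiles_eq z hz]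
  simp only [if_neg (by decide : ¬ PySem.Str.lower "right" = "left"),
    if_pos (by decide : PySem.Str.lower "right" = "right"),
    if_neg (by decide : ¬ PySem.Str.lower "right" = "up"),
    if_neg (by decide : ¬ PySem.Str.lower "right" = "down")]
  by_cases h : x < 2 ^ z.toNat - 1
  · rw [if_pos h, enc_eq _ _ _ (by omega) (by omega) (by omega) (by omega) hy,
      Int.emod_eq_of_lt (by omega) (by omega)]
  · rw [if_neg h]
    have hx1 : x = 2 ^ z.toNat - 1 := by omega
    have : (x + 1) % 2 ^ z.toNat = 0 := by
      rw [hx1]; simp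
    rw [this, enc_eq _ _ _ (by omega) (by omega) (by omega) hT hy]

lemma sibling_left (z x y : Int) (hz : 1 ≤ z) (hz29 : z ≤ 29) (hx : 0 ≤ x)
    (hx' : x < 2 ^ z.toNat) (hy : 0 ≤ y) :
    sibling (encV z x y) "left"
      = some (encV z ((x - 1) % 2 ^ z.toNat) y) := by
  have hT : (0:Int) < 2 ^ z.toNat := by positivity
  have hq := encV_pos z x y hz hx hy
  rw [sibling, if_neg (by omega)]
  simp only [dec_enc z x y (by omega) (by omega) hx hx' hy]
  rw [if_neg (by decide), if_neg (by omega), tiles_eq z hz]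
  simp only [if_pos (by decide : PySem.Str.lower "left" = "left"),
    if_neg (by decide : ¬ PySem.Str.lower "left" = "right"),
    if_neg (by decide : ¬ PySem.Str.lower "left" = "up"),
    if_neg (by decide : ¬ PySem.Str.lower "left" = "down")]
  by_cases h : x > 0
  · rw [if_pos h, enc_eq _ _ _ (by omega) (by omega) (by omega) (by omega) hy,
      Int.emod_eq_of_lt (by omega) (by omega)]
  · rw [if_neg h]
    have hx0 : x = 0 := by omega
    have : (x - 1) % 2 ^ z.toNat = 2 ^ z.toNat - 1 := by
      rw [hx0]
      have h1 : ((0:Int) - 1) % 2 ^ z.toNat = (2 ^ z.toNat - 1) % 2 ^ z.toNat := by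
        conv_lhs => rw [show (0:Int) - 1 = (2 ^ z.toNat - 1) - 2 ^ z.toNat by ring]
        rw [Int.sub_emod_right]
      rw [h1, Int.emod_eq_of_lt (by omega) (by omega)]
    rw [this, enc_eq _ _ _ (by omega) (by omega) (by omega) (by omega) hy]

lemma sibling_up (z x y : Int) (hz : 1 ≤ z) (hz29 : z ≤ 29) (hx : 0 ≤ x)
    (hx' : x < 2 ^ z.toNat) (hy : 0 ≤ y) (hy' : y < 2 ^ z.toNat) :
    sibling (encV z x y) "up"
      = some (encV z x ((y - 1) % 2 ^ z.toNat)) := by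
  have hT : (0:Int) < 2 ^ z.toNat := by positivity
  have hq := encV_pos z x y hz hx hy
  rw [sibling, if_neg (by omega)]
  simp only [dec_enc z x y (by omega) (by omega) hx hx' hy]
  rw [if_neg (by decide), if_neg (by omega), tiles_eq z hz]
  simp only [if_neg (by decide : ¬ PySem.Str.lower "up" = "left"),
    if_neg (by decide : ¬ PySem.Str.lower "up" = "right"),
    if_pos (by decide : PySem.Str.lower "up" = "up"),
    if_neg (by decide : ¬ PySem.Str.lower "up" = "down")]
  by_cases h : y > 0
  · rw [if_pos h, enc_eq _ _ _ (by omega) (by omega) hx hx' (by omega),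
      Int.emod_eq_of_lt (by omega) (by omega)]
  · rw [if_neg h]
    have hy0 : y = 0 := by omega
    have : (y - 1) % 2 ^ z.toNat = 2 ^ z.toNat - 1 := by
      rw [hy0]
      have h1 : ((0:Int) - 1) % 2 ^ z.toNat = (2 ^ z.toNat - 1) % 2 ^ z.toNat := by
        conv_lhs => rw [show (0:Int) - 1 = (2 ^ z.toNat - 1) - 2 ^ z.toNat by ring]
        rw [Int.sub_emod_right]
      rw [h1, Int.emod_eq_of_lt (by omega) (by omega)]
    rw [this, enc_eq _ _ _ (by omega) (by omega) hx hx' (by omega)]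

lemma sibling_down (z x y : Int) (hz : 1 ≤ z) (hz29 : z ≤ 29) (hx : 0 ≤ x)
    (hx' : x < 2 ^ z.toNat) (hy : 0 ≤ y) (hy' : y < 2 ^ z.toNat) :
    sibling (encV z x y) "down"
      = some (encV z x ((y + 1) % 2 ^ z.toNat)) := by
  have hT : (0:Int) < 2 ^ z.toNat := by positivity
  have hq := encV_pos z x y hz hx hy
  rw [sibling, if_neg (by omega)]
  simp only [dec_enc z x y (by omega) (by omega) hx hx' hy]
  rw [if_neg (by decide), if_neg (by omega), tiles_eq z hz]
  simp only [if_neg (by decide : ¬ PySem.Str.lower "down" = "left"),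
    if_neg (by decide : ¬ PySem.Str.lower "down" = "right"),
    if_neg (by decide : ¬ PySem.Str.lower "down" = "up"),
    if_pos (by decide : PySem.Str.lower "down" = "down")]
  by_cases h : y < 2 ^ z.toNat - 1
  · rw [if_pos h, enc_eq _ _ _ (by omega) (by omega) hx hx' (by omega),
      Int.emod_eq_of_lt (by omega) (by omega)]
  · rw [if_neg h]
    have hy1 : y = 2 ^ z.toNat - 1 := by omega
    have : (y + 1) % 2 ^ z.toNat = 0 := by rw [hy1]; simp
    rw [this, enc_eq _ _ _ (by omega) (by omega) hx hx' (by omega)]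

lemma sibling_zero (d : String) : sibling 0 d = some 0 := by
  rw [sibling, if_pos rfl]

lemma emod_sub_emod' (a b T : Int) : (a % T - b) % T = (a - b) % T := by
  rw [Int.sub_emod, Int.emod_emod_of_dvd _ dvd_rfl, ← Int.sub_emod]

lemma emod_add_emod' (a b T : Int) : (a % T + b) % T = (a + b) % T := by
  rw [Int.add_emod, Int.emod_emod_of_dvd _ dvd_rfl, ← Int.add_emod]

lemma corner_fold (z : Int) (hz : 1 ≤ z) (hz29 : z ≤ 29) (l : List Int) :
    ∀ (x y : Int), 0 ≤ x → x < 2 ^ z.toNat → 0 ≤ y → y < 2 ^ z.toNat →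
    l.foldl (fun c _ => (c.bind (fun q => sibling q "left")).bind (fun q => sibling q "up"))
        (some (encV z x y))
      = some (encV z ((x - l.length) % 2 ^ z.toNat) ((y - l.length) % 2 ^ z.toNat)) := by
  have hT : (0:Int) < 2 ^ z.toNat := by positivity
  induction l with
  | nil =>
    intro x y hx hx' hy hy'
    simp only [List.foldl_nil, List.length_nil, Nat.cast_zero, sub_zero,
      Int.emod_eq_of_lt hx hx', Int.emod_eq_of_lt hy hy']
  | cons hd tl ih =>
    intro x y hx hx' hy hy'
    rw [List.foldl_cons]
    have hstep : (((some (encV z x y)).bind (fun q => sibling q "left")).bind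
        (fun q => sibling q "up"))
        = some (encV z ((x - 1) % 2 ^ z.toNat) ((y - 1) % 2 ^ z.toNat)) := by
      rw [Option.bind_some, sibling_left z x y hz hz29 hx hx' hy, Option.bind_some,
        sibling_up z _ y hz hz29 (Int.emod_nonneg _ (by omega)) (Int.emod_lt_of_pos _ hT) hy hy']
    rw [hstep, ih _ _ (Int.emod_nonneg _ (by omega)) (Int.emod_lt_of_pos _ hT)
      (Int.emod_nonneg _ (by omega)) (Int.emod_lt_of_pos _ hT)]
    rw [emod_sub_emod', emod_sub_emod']
    norm_num
    rw [show x - 1 - (tl.length : Int) = x - ((tl.length : Int) + 1) by ring,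
      show y - 1 - (tl.length : Int) = y - ((tl.length : Int) + 1) by ring]

lemma pyRange_zero_eq (m : Int) :
    PySem.List.pyRange 0 m 1 = (List.range m.toNat).map (fun k : Nat => (k : Int)) := by
  rw [PySem.List.pyRange_one]; norm_num

lemma inner_fold (z size jv : Int) (hz : 1 ≤ z) (hz29 : z ≤ 29) (p : Nat) :
    ∀ (x y : Int) (acc : List (List (String × Int))),
    0 ≤ x → x < 2 ^ z.toNat → 0 ≤ y → y < 2 ^ z.toNat →
    ((List.range p).map (fun k : Nat => (k : Int))).foldl
      (fun (st2 : List (List (String × Int)) × Option Int) i =>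
        (st2.1 ++ [[("index", st2.2.getD 0), ("distance", max |i - size| |jv - size|)]],
         st2.2.bind (fun q => sibling q "right")))
      (acc, some (encV z x y))
    = (acc ++ (List.range p).map (fun k : Nat =>
        [("index", encV z ((x + (k : Int)) % 2 ^ z.toNat) y),
         ("distance", max |(k : Int) - size| |jv - size|)]),
       some (encV z ((x + (p : Int)) % 2 ^ z.toNat) y)) := by
  have hT : (0:Int) < 2 ^ z.toNat := by positivity
  induction p with
  | zero =>
    intro x y acc hx hx' hy hy'
    simp only [List.range_zero, List.map_nil, List.foldl_nil, List.append_nil,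
      Nat.cast_zero, add_zero, Int.emod_eq_of_lt hx hx']
  | succ p ih =>
    intro x y acc hx hx' hy hy'
    rw [List.range_succ, List.map_append, List.map_append, List.foldl_append,
      ih x y acc hx hx' hy hy']
    simp only [List.map_cons, List.map_nil, List.foldl_cons, List.foldl_nil,
      Option.getD_some, Option.bind_some]
    rw [sibling_right z _ y hz hz29 (Int.emod_nonneg _ (by omega)) (Int.emod_lt_of_pos _ hT) hy hy']
    rw [emod_add_emod', List.append_assoc]
    push_cast
    ring_nf

lemma outer_fold (z size : Int) (hz : 1 ≤ z) (hz29 : z ≤ 29) (p : Nat) :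
    ∀ (x y : Int) (acc : List (List (String × Int))),
    0 ≤ x → x < 2 ^ z.toNat → 0 ≤ y → y < 2 ^ z.toNat →
    ((List.range p).map (fun k : Nat => (k : Int))).foldl
      (fun (st : List (List (String × Int)) × Option Int) j =>
        let inner := (PySem.List.pyRange 0 (size * 2 + 1) 1).foldl
          (fun (st2 : List (List (String × Int)) × Option Int) i =>
            (st2.1 ++ [[("index", st2.2.getD 0), ("distance", max |i - size| |j - size|)]],
             st2.2.bind (fun q => sibling q "right")))
          (st.1, st.2)
        (inner.1, st.2.bind (fun q => sibling q "down")))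
      (acc, some (encV z x y))
    = (acc ++ (List.range p).flatMap (fun j : Nat =>
        (List.range (size * 2 + 1).toNat).map (fun k : Nat =>
          [("index", encV z ((x + (k : Int)) % 2 ^ z.toNat) ((y + (j : Int)) % 2 ^ z.toNat)),
           ("distance", max |(k : Int) - size| |(j : Int) - size|)])),
       some (encV z x ((y + (p : Int)) % 2 ^ z.toNat))) := by
  have hT : (0:Int) < 2 ^ z.toNat := by positivity
  induction p with
  | zero =>
    intro x y acc hx hx' hy hy'
    simp only [List.range_zero, List.map_nil, List.foldl_nil, List.flatMap_nil,
      List.append_nil, Nat.cast_zero, add_zero, Int.emod_eq_of_lt hy hy']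
  | succ p ih =>
    intro x y acc hx hx' hy hy'
    rw [List.range_succ, List.map_append, List.foldl_append,
      ih x y acc hx hx' hy hy']
    simp only [List.map_cons, List.map_nil, List.foldl_cons, List.foldl_nil]
    rw [pyRange_zero_eq]
    rw [inner_fold z size (p : Int) hz hz29 (size * 2 + 1).toNat x ((y + (p : Int)) % 2 ^ z.toNat)
      _ hx hx' (Int.emod_nonneg _ (by omega)) (Int.emod_lt_of_pos _ hT)]
    simp only [Option.bind_some]
    rw [sibling_down z x _ hz hz29 hx hx' (Int.emod_nonneg _ (by omega)) (Int.emod_lt_of_pos _ hT)]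
    rw [emod_add_emod', List.flatMap_append, List.append_assoc]
    simp only [List.flatMap_cons, List.flatMap_nil, List.append_nil]
    push_cast
    ring_nf

lemma pyRange_nil (m : Int) (h : m ≤ 0) : PySem.List.pyRange 0 m 1 = [] := by
  rw [pyRange_zero_eq, show m.toNat = 0 by omega, List.range_zero, List.map_nil]

lemma corner_fold_zero (l : List Int) :
    l.foldl (fun c _ => (c.bind (fun q => sibling q "left")).bind (fun q => sibling q "up"))
      (some 0) = some 0 := by
  induction l with
  | nil => rfl
  | cons hd tl ih =>
    rw [List.foldl_cons, Option.bind_some, sibling_zero, Option.bind_some, sibling_zero, ih]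

lemma inner_fold_zero (size jv : Int) (l : List Int) :
    ∀ (acc : List (List (String × Int))),
    l.foldl
      (fun (st2 : List (List (String × Int)) × Option Int) i =>
        (st2.1 ++ [[("index", st2.2.getD 0), ("distance", max |i - size| |jv - size|)]],
         st2.2.bind (fun q => sibling q "right")))
      (acc, some 0)
    = (acc ++ l.map (fun i =>
        [("index", (0:Int)), ("distance", max |i - size| |jv - size|)]), some 0) := by
  induction l with
  | nil => intro acc; simp
  | cons hd tl ih =>
    intro acc
    rw [List.foldl_cons]
    simp only [Option.getD_some, Option.bind_some, sibling_zero]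
    rw [ih, List.map_cons, List.append_assoc]
    rfl

lemma outer_fold_zero (size : Int) (l : List Int) :
    ∀ (acc : List (List (String × Int))),
    l.foldl
      (fun (st : List (List (String × Int)) × Option Int) j =>
        let inner := (PySem.List.pyRange 0 (size * 2 + 1) 1).foldl
          (fun (st2 : List (List (String × Int)) × Option Int) i =>
            (st2.1 ++ [[("index", st2.2.getD 0), ("distance", max |i - size| |j - size|)]],
             st2.2.bind (fun q => sibling q "right")))
          (st.1, st.2)
        (inner.1, st.2.bind (fun q => sibling q "down")))
      (acc, some 0)
    = (acc ++ l.flatMap (fun j =>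
        (PySem.List.pyRange 0 (size * 2 + 1) 1).map (fun i =>
          [("index", (0:Int)), ("distance", max |i - size| |j - size|)])), some 0) := by
  induction l with
  | nil => intro acc; simp
  | cons hd tl ih =>
    intro acc
    rw [List.foldl_cons]
    simp only [Option.bind_some, sibling_zero]
    rw [inner_fold_zero size hd _ acc, ih, List.flatMap_cons, List.append_assoc]

lemma valid_case (origin size z x y : Int) (hz1 : 1 ≤ z) (hz29 : z ≤ 29)
    (hx : 0 ≤ x) (hx' : x < 2 ^ z.toNat) (hy : 0 ≤ y) (hy' : y < 2 ^ z.toNat)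
    (henc : origin = encV z x y) (hdec : zxy_from_quadint origin = (z, x, y))
    (hs : 0 ≤ size) :
    kring_distances origin size = kring_distances_alt origin size := by
  have hT : (0:Int) < 2 ^ z.toNat := by positivity
  have ho0 : origin ≠ 0 := by
    have := encV_pos z x y hz1 hx hy; omega
  have hrow : ∀ (a b : Int), (quadint_from_zxy z (a % 2 ^ z.toNat) (b % 2 ^ z.toNat)).getD 0
      = encV z (a % 2 ^ z.toNat) (b % 2 ^ z.toNat) := by
    intro a b
    rw [enc_eq z _ _ (by omega) (by omega) (Int.emod_nonneg _ (by omega))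
      (Int.emod_lt_of_pos _ hT) (Int.emod_nonneg _ (by omega))]
    rfl
  have hA : kring_distances origin size
      = (List.range (size * 2 + 1).toNat).flatMap (fun j : Nat =>
          (List.range (size * 2 + 1).toNat).map (fun k : Nat =>
            [("index", encV z ((x - size + (k : Int)) % 2 ^ z.toNat)
                ((y - size + (j : Int)) % 2 ^ z.toNat)),
             ("distance", max |(k : Int) - size| |(j : Int) - size|)])) := by
    simp only [kring_distances]
    rw [pyRange_zero_eq size, henc,
      corner_fold z hz1 hz29 _ x y hx hx' hy hy']
    simp only [List.length_map, List.length_range]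
    rw [show ((size.toNat : Int)) = size from by omega]
    nth_rewrite 2 [pyRange_zero_eq (size * 2 + 1)]
    rw [outer_fold z size hz1 hz29 (size * 2 + 1).toNat ((x - size) % 2 ^ z.toNat)
      ((y - size) % 2 ^ z.toNat) [] (Int.emod_nonneg _ (by omega)) (Int.emod_lt_of_pos _ hT)
      (Int.emod_nonneg _ (by omega)) (Int.emod_lt_of_pos _ hT)]
    simp only [List.nil_append, emod_add_emod']
  have hB : kring_distances_alt origin size
      = (List.range (2 * size + 1).toNat).flatMap (fun j : Nat =>
          (List.range (2 * size + 1).toNat).map (fun k : Nat =>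
            [("index", encV z ((x - size + (k : Int)) % 2 ^ z.toNat)
                ((y - size + (j : Int)) % 2 ^ z.toNat)),
             ("distance", max |(k : Int) - size| |(j : Int) - size|)])) := by
    simp only [kring_distances_alt]
    rw [if_neg (by omega : ¬ (2 * size + 1 ≤ 0)), if_neg ho0, hdec]
    simp only [tiles_eq z hz1]
    simp only [PySem.Int.mod_eq_emod_of_pos hT]
    simp only [hrow]
    rw [pyRange_zero_eq (2 * size + 1)]
    rw [List.flatMap_map]
    simp only [List.map_map, Function.comp_def]
  rw [hA, hB, show size * 2 + 1 = 2 * size + 1 from by ring]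

lemma neg_case (origin size : Int) (hs : size < 0) :
    kring_distances origin size = kring_distances_alt origin size := by
  simp only [kring_distances, kring_distances_alt]
  rw [pyRange_nil (size * 2 + 1) (by omega), if_pos (by omega : 2 * size + 1 ≤ 0)]
  simp only [List.foldl_nil]

lemma zero_case (size : Int) (hs : 0 ≤ size) :
    kring_distances 0 size = kring_distances_alt 0 size := by
  simp only [kring_distances, kring_distances_alt]
  rw [corner_fold_zero, outer_fold_zero size _ []]
  rw [if_neg (by omega : ¬ (2 * size + 1 ≤ 0))]
  simp only [if_true]
  simp only [List.nil_append]
  rw [show size * 2 + 1 = 2 * size + 1 from by ring]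

-- ===== VERDICT (by name: the statement is the Claim_ definition above) =====
theorem kring_distances_spec : Claim_equal_kring_distances := by
  intro origin size _ hpre
  show kring_distances origin size = kring_distances_alt origin size
  by_cases hs : size < 0
  · exact neg_case origin size hs
  · rcases hpre with h | h | ⟨h0, h1, h2, h3⟩
    · exact absurd h hs
    · subst h; exact zero_case size (by omega)
    · have hband : PySem.Int.band origin 31 = origin % 32 := by
        have := band_mask origin 5 h0; norm_num at this ⊢; exact this
      rw [hband] at h1 h2 h3
      have hsh : origin >>> (origin % 32 + 5).toNat
          = origin / 2 ^ ((origin % 32).toNat + 5) := by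
        rw [shr_arith]
        congr 2
        omega
      rw [hsh] at h3
      have hT : (0:Int) < 2 ^ (origin % 32).toNat := by positivity
      have e1 := Int.ediv_add_emod origin 32
      have e2 := Int.ediv_add_emod (origin / 32) (2 ^ (origin % 32).toNat)
      have e3 : origin / 2 ^ ((origin % 32).toNat + 5)
          = origin / 32 / 2 ^ (origin % 32).toNat := by
        rw [show ((2:Int) ^ ((origin % 32).toNat + 5)) = 32 * 2 ^ (origin % 32).toNat by
          rw [pow_add]; ring, ← Int.ediv_ediv_eq_ediv_mul]
        norm_num
      have henc : origin = encV (origin % 32) (origin / 32 % 2 ^ ((origin % 32).toNat))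
          (origin / 2 ^ ((origin % 32).toNat + 5)) := by
        rw [encV, e3]
        linear_combination -e1 - 32 * e2
      exact valid_case origin size _ _ _ h1 h2
        (Int.emod_nonneg _ (by omega)) (Int.emod_lt_of_pos _ hT)
        (Int.ediv_nonneg h0 (by positivity)) h3 henc (dec_arith origin h0) (by omega)
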